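-- pv_equiv track=rewrite | github.com/RitikaKulshresth/python-practice | String_positive_Cumulative_Sum.py | Positive_Cumulative_sum
-- ===== SOURCE A (Python) =====
-- def Positive_Cumulative_sum(arr):
--     sum=0
--
--     list1=[]
--     for i in range(0,len(arr)):
--         sum+=arr[i]
--         if sum < 1:
--             continue
--         else:
--             list1.append(sum)
--     return list1
-- ===== SOURCE B (Python) =====
-- def Positive_Cumulative_sum(arr):
--     # Right-to-left: start from the grand total and peel elements off the back,
--     # so s successively takes every prefix-sum value (last first); collect
--     # those >= 1 back-to-front and reverse once at the end.
--     out = []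
--     s = sum(arr)
--     for x in reversed(arr):
--         if s >= 1:
--             out.append(s)
--         s -= x
--     out.reverse()
--     return out
-- ===== Notes on version B (the rewrite author's own statement) =====
-- stated objective: alternative
-- what changed: A accumulates prefix sums left-to-right and filters inline; B computes the grand total once, then walks the array right-to-left subtracting elements so each state value is a prefix sum, collecting the ones >= 1 back-to-front and reversing at the end.
import Mathlib
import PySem

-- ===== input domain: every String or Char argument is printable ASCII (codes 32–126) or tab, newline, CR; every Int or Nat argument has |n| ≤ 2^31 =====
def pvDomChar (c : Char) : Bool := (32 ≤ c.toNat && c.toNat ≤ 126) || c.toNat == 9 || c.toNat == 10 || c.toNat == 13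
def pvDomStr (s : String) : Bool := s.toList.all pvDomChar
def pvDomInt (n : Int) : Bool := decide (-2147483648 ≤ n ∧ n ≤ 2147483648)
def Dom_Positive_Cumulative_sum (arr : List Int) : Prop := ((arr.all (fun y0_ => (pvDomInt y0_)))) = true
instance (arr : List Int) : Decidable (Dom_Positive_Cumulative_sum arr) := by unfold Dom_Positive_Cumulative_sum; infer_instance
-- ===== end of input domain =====

-- B walks the array right-to-left from the grand total, subtracting elements so each state value is a prefix sum, collecting those >= 1 back-to-front; A accumulates left-to-right and filters inline.


-- ===== PORT A =====
def Positive_Cumulative_sum (arr : List Int) : List Int :=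
  ((PySem.List.pyRange 0 (arr.length : Int) 1).foldl
    (fun (st : Int × List Int) i =>
      let s := st.1 + PySem.List.pyGetD arr i 0
      if s < 1 then (s, st.2) else (s, st.2 ++ [s]))
    (0, [])).2

-- ===== PORT B =====
-- for x in reversed(arr): append s when s >= 1, then s -= x; finally reverse out
def Positive_Cumulative_sum_alt (arr : List Int) : List Int :=
  (arr.reverse.foldl
    (fun (st : Int × List Int) x =>
      (st.1 - x, if 1 ≤ st.1 then st.2 ++ [st.1] else st.2))
    (arr.sum, [])).2.reverse

-- ===== PRECONDITION & SPEC =====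
def Spec_Positive_Cumulative_sum (arr : List Int) (out : List Int) : Prop := out = Positive_Cumulative_sum_alt arr
instance (arr : List Int) (out : List Int) : Decidable (Spec_Positive_Cumulative_sum arr out) := by unfold Spec_Positive_Cumulative_sum; infer_instance

-- ===== CLAIM (what is proved, stated in full; the proofs are below) =====
def Claim_equal_Positive_Cumulative_sum : Prop := ∀ (arr : List Int), Dom_Positive_Cumulative_sum arr → Spec_Positive_Cumulative_sum arr (Positive_Cumulative_sum arr)

-- ===== LEMMAS AND PROOFS =====
-- prefix sums of l starting from running sum s (characterises A's s-sequence)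
def pvAccum (s : Int) : List Int → List Int
  | [] => []
  | x :: xs => (s + x) :: pvAccum (s + x) xs

-- the descending s-sequence of B's right-to-left loop
def pvDesc (s : Int) : List Int → List Int
  | [] => []
  | x :: xs => s :: pvDesc (s - x) xs

theorem foldl_eq_accum_filter (arr : List Int) (s : Int) (acc : List Int) :
    (arr.foldl (fun (st : Int × List Int) x =>
        let t := st.1 + x
        if t < 1 then (t, st.2) else (t, st.2 ++ [t])) (s, acc)).2
      = acc ++ (pvAccum s arr).filter (fun s => decide (1 ≤ s)) := by
  induction arr generalizing s acc with
  | nil => simp [pvAccum]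
  | cons x xs ih =>
    simp only [List.foldl_cons, pvAccum, List.filter_cons]
    by_cases h : s + x < 1
    · have : ¬ (1 ≤ s + x) := by omega
      simp [h, this, ih]
    · have : (1 ≤ s + x) := by omega
      simp [h, this, ih]

theorem foldl_eq_desc_filter (l : List Int) (s : Int) (acc : List Int) :
    (l.foldl (fun (st : Int × List Int) x =>
        (st.1 - x, if 1 ≤ st.1 then st.2 ++ [st.1] else st.2)) (s, acc)).2
      = acc ++ (pvDesc s l).filter (fun s => decide (1 ≤ s)) := by
  induction l generalizing s acc with
  | nil => simp [pvDesc]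
  | cons x xs ih =>
    simp only [List.foldl_cons, pvDesc, List.filter_cons]
    by_cases h : 1 ≤ s
    · simp [h, ih]
    · simp [h, ih]

theorem pvDesc_append (t : Int) (l1 l2 : List Int) :
    pvDesc t (l1 ++ l2) = pvDesc t l1 ++ pvDesc (t - l1.sum) l2 := by
  induction l1 generalizing t with
  | nil => simp [pvDesc]
  | cons x xs ih =>
    have h : t - x - xs.sum = t - (x + xs.sum) := by ring
    simp only [List.cons_append, pvDesc, ih, List.sum_cons, h]

theorem pvDesc_reverse_eq (arr : List Int) (s : Int) :
    pvDesc (s + arr.sum) arr.reverse = (pvAccum s arr).reverse := by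
  induction arr generalizing s with
  | nil => simp [pvDesc, pvAccum]
  | cons x xs ih =>
    simp only [List.reverse_cons, pvAccum, pvDesc_append, List.reverse_cons]
    have h1 : s + (x :: xs).sum = (s + x) + xs.sum := by simp; ring
    rw [h1, ih (s + x)]
    have h2 : s + x + xs.sum - xs.reverse.sum = s + x := by simp
    rw [h2]
    simp [pvDesc]

-- ===== VERDICT (by name: the statement is the Claim_ definition above) =====
theorem Positive_Cumulative_sum_spec : Claim_equal_Positive_Cumulative_sum := by
  intro arr _
  show Positive_Cumulative_sum arr = Positive_Cumulative_sum_alt arr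
  unfold Positive_Cumulative_sum Positive_Cumulative_sum_alt
  rw [PySem.List.foldl_pyRange_zero_pyGetD' arr 0
      (fun (st : Int × List Int) x =>
        let s := st.1 + x
        if s < 1 then (s, st.2) else (s, st.2 ++ [s])) (0, [])]
  rw [foldl_eq_accum_filter arr 0 [], foldl_eq_desc_filter arr.reverse arr.sum []]
  have : (0 : Int) + arr.sum = arr.sum := by ring
  rw [← this, pvDesc_reverse_eq arr 0]
  simp [List.filter_reverse]
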